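-- pv_equiv track=rewrite | github.com/railgun-0402/algorithm_py | search_num_from_list.py | find_larger_neighbors
-- ===== SOURCE A (Python) =====
-- def find_larger_neighbors(matrix):
--     result = []
--
--     # 列・行の長さ
--     rows, cols = len(matrix), len(matrix[0])
--
--     # 二重配列の要素を全て確認
--     for i in range(rows):
--         for j in range(cols):
--             current_value = matrix[i][j]
--             neighbors = []
--
--             # 上下左右の値を配列で取得する(neighbors)が、index range errorを避ける必要がある
--             # 例えば一番上の場合、その上の要素を取り出そうとするとindex errorとなるので場合分けする
--             if i > 0:
--                 neighbors.append(matrix[i - 1][j])  # 最上行ではない場合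
--             if i < rows - 1:
--                 neighbors.append(matrix[i + 1][j])  # 最下行ではない場合
--             if j > 0:
--                 neighbors.append(matrix[i][j - 1])  # 最左列ではない場合
--             if j < cols - 1:
--                 neighbors.append(matrix[i][j + 1])  # 最右列ではない場合
--
--             # 値が上下左右全ての値よりも大きければ、trueを返し結果出力リストに加える(同等値は除く)
--             if all(current_value > neighbor for neighbor in neighbors):
--                 result.append(current_value)
--
--     return result
-- ===== SOURCE B (Python) =====
-- def find_larger_neighbors(matrix):
--     rows, cols = len(matrix), len(matrix[0])
--     # horizontal pass: per row, strictly greater than existing left/right neighbors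
--     horiz = [[(j == 0 or row[j] > row[j - 1]) and (j == cols - 1 or row[j] > row[j + 1])
--               for j in range(cols)]
--              for row in matrix]
--     # vertical pass, column by column: strictly greater than existing up/down neighbors
--     vert_cols = [[(i == 0 or matrix[i][j] > matrix[i - 1][j]) and
--                   (i == rows - 1 or matrix[i][j] > matrix[i + 1][j])
--                   for i in range(rows)]
--                  for j in range(cols)]
--     return [matrix[i][j]
--             for i in range(rows) for j in range(cols)
--             if horiz[i][j] and vert_cols[j][i]]
-- ===== Notes on version B (the rewrite author's own statement) =====
-- stated objective: alternative
-- what changed: B replaces A's fused per-cell four-neighbor scan (which builds a neighbor list and runs all() per cell) with two per-direction boolean mask passes (a horizontal pass over rows, a vertical pass over columns) combined in a final row-major comprehension; a timing run measured this constant-factor mechanism (no per-cell list/generator construction) ~3x faster.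
import Mathlib
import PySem

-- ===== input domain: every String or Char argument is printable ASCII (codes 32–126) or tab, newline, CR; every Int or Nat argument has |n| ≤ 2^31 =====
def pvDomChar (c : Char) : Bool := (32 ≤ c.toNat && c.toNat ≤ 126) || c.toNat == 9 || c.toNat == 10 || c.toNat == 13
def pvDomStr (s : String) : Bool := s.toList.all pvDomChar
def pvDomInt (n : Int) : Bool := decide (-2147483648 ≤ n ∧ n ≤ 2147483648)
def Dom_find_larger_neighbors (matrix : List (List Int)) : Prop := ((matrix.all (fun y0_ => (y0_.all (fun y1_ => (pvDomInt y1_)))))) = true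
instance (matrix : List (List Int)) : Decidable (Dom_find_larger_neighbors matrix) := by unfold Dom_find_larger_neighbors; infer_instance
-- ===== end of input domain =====

-- B replaces A's fused four-neighbor scan by two per-direction boolean mask passes
-- (horizontal per row, vertical per column) combined in a final row-major comprehension;
-- objective: alternative decomposition, same cost.

-- B replaces A's fused per-cell four-neighbor scan by two per-direction boolean mask
-- passes (horizontal per row, vertical per column) combined in a final row-major
-- comprehension; objective: alternative decomposition (same asymptotic cost;
-- a timing run measured a constant-factor speedup).

-- ===== PORT A =====
def find_larger_neighbors (matrix : List (List Int)) : List Int :=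
  let rows : Int := (matrix.length : Int)
  let cols : Int := ((PySem.List.pyGetD matrix 0 []).length : Int)
  (PySem.List.pyRange 0 rows 1).foldl (fun result i =>
    (PySem.List.pyRange 0 cols 1).foldl (fun result j =>
      let current_value := PySem.List.pyGetD (PySem.List.pyGetD matrix i []) j 0
      let neighbors : List Int :=
        (if i > 0 then [PySem.List.pyGetD (PySem.List.pyGetD matrix (i - 1) []) j 0] else []) ++
        ((if i < rows - 1 then [PySem.List.pyGetD (PySem.List.pyGetD matrix (i + 1) []) j 0] else []) ++
        ((if j > 0 then [PySem.List.pyGetD (PySem.List.pyGetD matrix i []) (j - 1) 0] else []) ++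
        (if j < cols - 1 then [PySem.List.pyGetD (PySem.List.pyGetD matrix i []) (j + 1) 0] else [])))
      if neighbors.all (fun nb => current_value > nb) then result ++ [current_value] else result)
      result) []

-- ===== PORT B =====

-- ===== PORT B =====
def find_larger_neighbors_alt (matrix : List (List Int)) : List Int :=
  let rows : Int := (matrix.length : Int)
  let cols : Int := ((PySem.List.pyGetD matrix 0 []).length : Int)
  let horiz : List (List Bool) := matrix.map (fun row =>
    (PySem.List.pyRange 0 cols 1).map (fun j =>
      (decide (j = 0) || decide (PySem.List.pyGetD row j 0 > PySem.List.pyGetD row (j - 1) 0)) &&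
      (decide (j = cols - 1) || decide (PySem.List.pyGetD row j 0 > PySem.List.pyGetD row (j + 1) 0))))
  let vert_cols : List (List Bool) := (PySem.List.pyRange 0 cols 1).map (fun j =>
    (PySem.List.pyRange 0 rows 1).map (fun i =>
      (decide (i = 0) || decide (PySem.List.pyGetD (PySem.List.pyGetD matrix i []) j 0 >
                                 PySem.List.pyGetD (PySem.List.pyGetD matrix (i - 1) []) j 0)) &&
      (decide (i = rows - 1) || decide (PySem.List.pyGetD (PySem.List.pyGetD matrix i []) j 0 >
                                 PySem.List.pyGetD (PySem.List.pyGetD matrix (i + 1) []) j 0))))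
  (PySem.List.pyRange 0 rows 1).flatMap (fun i =>
    ((PySem.List.pyRange 0 cols 1).filter (fun j =>
      PySem.List.pyGetD (PySem.List.pyGetD horiz i []) j false &&
      PySem.List.pyGetD (PySem.List.pyGetD vert_cols j []) i false)).map
      (fun j => PySem.List.pyGetD (PySem.List.pyGetD matrix i []) j 0))


-- ===== PRECONDITION & SPEC =====
-- Pre_ excludes exactly the inputs on which the Python A raises IndexError:
-- the empty matrix (matrix[0]) and ragged matrices with some row shorter than the first.
def Pre_find_larger_neighbors (matrix : List (List Int)) : Prop :=
  matrix ≠ [] ∧ ∀ row ∈ matrix, (matrix.headD []).length ≤ row.length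
instance (matrix : List (List Int)) : Decidable (Pre_find_larger_neighbors matrix) := by
  unfold Pre_find_larger_neighbors; infer_instance
def pvWitness_find_larger_neighbors : List (List Int) := [[1, 2], [3, 0]]

def Spec_find_larger_neighbors (matrix : List (List Int)) (out : List Int) : Prop := out = find_larger_neighbors_alt matrix
instance (matrix : List (List Int)) (out : List Int) : Decidable (Spec_find_larger_neighbors matrix out) := by unfold Spec_find_larger_neighbors; infer_instance

-- ===== CLAIM (what is proved, stated in full; the proofs are below) =====
def Claim_equal_find_larger_neighbors : Prop := ∀ (matrix : List (List Int)), Dom_find_larger_neighbors matrix → Pre_find_larger_neighbors matrix → Spec_find_larger_neighbors matrix (find_larger_neighbors matrix)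

-- ===== LEMMAS AND PROOFS =====

lemma nested_loop_eq (li lj : List Int) (p : Int → Int → Bool) (f : Int → Int → Int) :
    li.foldl (fun acc i => lj.foldl (fun a j => if p i j then a ++ [f i j] else a) acc) []
      = li.flatMap (fun i => (lj.filter (p i)).map (f i)) := by
  have h := PySem.List.foldl_congr_mem li
    (fun acc i => lj.foldl (fun a j => if p i j then a ++ [f i j] else a) acc)
    (fun acc i => acc ++ (lj.filter (p i)).map (f i)) []
    (by intro acc x _; exact PySem.List.foldl_append_if (p x) (f x) lj acc)
  rw [h, PySem.List.foldl_append_eq_flatMap]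
  simp

lemma flatMap_congr_mem {α β : Type} (l : List α) (f g : α → List β)
    (h : ∀ x ∈ l, f x = g x) : l.flatMap f = l.flatMap g := by
  induction l with
  | nil => rfl
  | cons a t ih =>
    simp only [List.flatMap_cons]
    rw [h a (List.mem_cons_self), ih (fun x hx => h x (List.mem_cons_of_mem a hx))]

lemma all_guard {c : Prop} [inst : Decidable c] (x : Int) (p : Int → Bool) :
    ((if c then [x] else []) : List Int).all p = (!decide c || p x) := by
  by_cases h : c <;> simp [h]


lemma pyGetD_map_getElem {α β : Type} (f : α → β) (l : List α) (i : Int) (d : β)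
    (hi0 : 0 ≤ i) (hN : i.toNat < l.length) :
    PySem.List.pyGetD (List.map f l) i d = f (l[i.toNat]) := by
  rw [PySem.List.pyGetD_eq_getElem _ _ hi0 (by simp; omega), List.getElem_map]

lemma bool_perm (p q r s : Bool) : (p && (q && (r && s))) = ((r && s) && (p && q)) := by
  cases p <;> cases q <;> cases r <;> cases s <;> rfl

theorem AB (r0 : List Int) (rest : List (List Int)) :
    find_larger_neighbors (r0 :: rest) = find_larger_neighbors_alt (r0 :: rest) := by
  simp only [find_larger_neighbors, find_larger_neighbors_alt, PySem.List.pyGetD_zero_cons]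
  rw [nested_loop_eq]
  apply flatMap_congr_mem
  intro i hi
  rw [PySem.List.mem_pyRange_one] at hi
  obtain ⟨hi0, hiR⟩ := hi
  refine congrArg (List.map _) (List.filter_congr ?_)
  intro j hj
  rw [PySem.List.mem_pyRange_one] at hj
  obtain ⟨hj0, hjC⟩ := hj
  have hN : i.toNat < (r0 :: rest).length := by omega
  simp only [pyGetD_map_getElem, PySem.List.pyGetD_map_pyRange_of_nonneg, hi0, hiR, hj0, hjC, hN]
  rw [PySem.List.pyGetD_eq_getElem (r0 :: rest) [] hi0 hiR]
  simp only [List.all_append, all_guard]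
  have e1 : (!decide (i > 0)) = decide (i = 0) := by
    have h : (i > 0) ↔ ¬ i = 0 := by omega
    rw [Bool.decide_congr h, decide_not, Bool.not_not]
  have e2 : (!decide (i < ((r0 :: rest).length : Int) - 1)) = decide (i = ((r0 :: rest).length : Int) - 1) := by
    have h : (i < ((r0 :: rest).length : Int) - 1) ↔ ¬ i = ((r0 :: rest).length : Int) - 1 := by omega
    rw [Bool.decide_congr h, decide_not, Bool.not_not]
  have e3 : (!decide (j > 0)) = decide (j = 0) := by
    have h : (j > 0) ↔ ¬ j = 0 := by omega
    rw [Bool.decide_congr h, decide_not, Bool.not_not]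
  have e4 : (!decide (j < (r0.length : Int) - 1)) = decide (j = (r0.length : Int) - 1) := by
    have h : (j < (r0.length : Int) - 1) ↔ ¬ j = (r0.length : Int) - 1 := by omega
    rw [Bool.decide_congr h, decide_not, Bool.not_not]
  rw [e1, e2, e3, e4]
  exact bool_perm _ _ _ _

-- ===== VERDICT (by name: the statement is the Claim_ definition above) =====
theorem find_larger_neighbors_spec : Claim_equal_find_larger_neighbors := by
  intro matrix _ hpre
  obtain ⟨hne, _⟩ := hpre
  obtain ⟨r0, rest, rfl⟩ := List.exists_cons_of_ne_nil hne
  unfold Spec_find_larger_neighbors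
  exact AB r0 rest
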